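-- pv_equiv track=rewrite | github.com/flowmatters/veneer-py | veneer/server_side.py | _generateLoop
-- ===== SOURCE A (Python) =====
-- def _generateLoop(theThing, innerLoop, first=False, names=None,inner_exception=''):
--     script = ''
--     script += "have_succeeded = False\n"
--     script += "ignoreExceptions = True\n"
--     indent = 0
--     indentText = ''
--     levels = theThing.split('.*')
--     prevLoop = ''
--     for level in levels[0:-1]:
--         loopVar = "i_%d" % indent
--         script += indentText + \
--             'for %s in %s%s:\n' % (loopVar, prevLoop, level)
--         indent += 1
--         indentText = ' ' * (indent * 4)
--         if names is not None:
--             script += indentText + \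
--                 '%s = %s\n' % (names[indent // 2], loopVar)
--         script += indentText + 'try:\n'
--         indent += 1
--         indentText = ' ' * (indent * 4)
--         prevLoop = loopVar + '.'
--     script += indentText
--     substCount = innerLoop.count('%s') // 2
--     script += innerLoop.replace('\n', '\n' +
--                                 indentText) % tuple([prevLoop, levels[-1]]
--                                                     * substCount)
--     script += '\n'
--     script += indentText + "have_succeeded = True\n"
--     inner_most = True
--     while indent > 0:
--         indent -= 1
--         indentText = ' ' * (indent * 4)
--         script += indentText + "except:\n"
--         if inner_most:
--             script += indentText + '  %s\n'%inner_exception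
--             inner_most = False
--         script += indentText + '  if not ignoreExceptions: raise\n'
--         if first:
--             script += indentText + "if have_succeeded: break\n"
--         indent -= 1
--
--     return script
-- ===== SOURCE B (Python) =====
-- def _generateLoop(theThing, innerLoop, first=False, names=None, inner_exception=''):
--     levels = theThing.split('.*')
--
--     def wrap(segs, depth, prevLoop):
--         pad = ' ' * (4 * depth)
--         if len(segs) == 1:
--             subst = tuple([prevLoop, segs[0]] * (innerLoop.count('%s') // 2))
--             return (pad + innerLoop.replace('\n', '\n' + pad) % subst + '\n'
--                     + pad + 'have_succeeded = True\n')
--         loopVar = 'i_%d' % depth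
--         inner = ' ' * (4 * (depth + 1))
--         block = pad + 'for %s in %s%s:\n' % (loopVar, prevLoop, segs[0])
--         if names is not None:
--             block += inner + '%s = %s\n' % (names[depth // 2], loopVar)
--         block += inner + 'try:\n'
--         block += wrap(segs[1:], depth + 2, loopVar + '.')
--         block += inner + 'except:\n'
--         if len(segs) == 2:
--             block += inner + '  %s\n' % inner_exception
--         block += inner + '  if not ignoreExceptions: raise\n'
--         if first:
--             block += inner + 'if have_succeeded: break\n'
--         return block
--
--     return 'have_succeeded = False\nignoreExceptions = True\n' + wrap(levels, 0, '')
-- ===== Notes on version B (the rewrite author's own statement) =====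
-- stated objective: alternative
-- what changed: B replaces A's two-phase construction (a forward loop emitting all loop headers with mutable indent/prevLoop state, followed by a separate while-loop unwinding the indent counter to emit all except-blocks) with a single recursive helper wrap(segs, depth, prevLoop) that emits each level's for/names/try lines, recurses for the inner block, and closes with that level's except-block, so no mutable indent counter or unwinding phase exists.
import Mathlib
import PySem

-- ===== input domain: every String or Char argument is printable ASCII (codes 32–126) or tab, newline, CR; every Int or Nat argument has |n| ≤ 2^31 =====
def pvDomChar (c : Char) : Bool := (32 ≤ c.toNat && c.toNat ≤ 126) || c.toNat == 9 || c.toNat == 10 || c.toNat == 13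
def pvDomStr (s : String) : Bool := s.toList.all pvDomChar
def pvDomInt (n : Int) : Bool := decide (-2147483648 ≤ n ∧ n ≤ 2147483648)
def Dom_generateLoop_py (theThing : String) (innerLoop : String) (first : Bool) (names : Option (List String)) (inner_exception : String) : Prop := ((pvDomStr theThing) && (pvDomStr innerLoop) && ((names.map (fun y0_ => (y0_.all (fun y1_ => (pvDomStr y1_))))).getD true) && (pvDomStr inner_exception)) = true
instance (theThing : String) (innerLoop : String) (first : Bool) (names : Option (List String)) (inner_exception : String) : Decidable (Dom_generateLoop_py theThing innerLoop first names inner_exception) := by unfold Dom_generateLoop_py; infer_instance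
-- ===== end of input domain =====

-- B re-implements the script generator as ONE recursive descent over the path segments that
-- emits each loop's "except" block right after its body (instead of A's two phases: a fold
-- building all loop headers plus a separate unwinding while-loop); return values are equal.

-- ===== PORT A =====
-- ' ' * n  (Python string repetition of a space)
def pvSpaces (n : Nat) : List Char := List.replicate n ' '

-- Python's '%'-formatting restricted to '%s' specifiers and the '%%' escape, applied to an
-- exact-length argument list; exact for Python on every format string admitted by Pre_ below.
def pvFmt : List Char → List String → List Char
  | '%' :: 's' :: r, args => (args.headD "").toList ++ pvFmt r args.tail
  | '%' :: '%' :: r, args => '%' :: pvFmt r args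
  | c :: r, args => c :: pvFmt r args
  | [], _ => []

-- the body of A's `for level in levels[0:-1]` loop; state = (script, indent, indentText, prevLoop)
def pvStepA (names : Option (List String)) (st : List Char × Nat × List Char × List Char) (level : String) : List Char × Nat × List Char × List Char :=
  let script := st.1
  let indent := st.2.1
  let indentText := st.2.2.1
  let prevLoop := st.2.2.2
  let loopVar := "i_".toList ++ (toString indent).toList
  let script := script ++ indentText ++ "for ".toList ++ loopVar ++ " in ".toList ++ prevLoop ++ level.toList ++ ":\n".toList
  let indent := indent + 1
  let indentText := pvSpaces (indent * 4)
  let script := match names with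
    | some ns => script ++ indentText ++ ((PySem.List.pyGet? ns ((indent / 2 : Nat) : Int)).getD "").toList ++ " = ".toList ++ loopVar ++ "\n".toList
    | none => script
  let script := script ++ indentText ++ "try:\n".toList
  let indent := indent + 1
  let indentText := pvSpaces (indent * 4)
  let prevLoop := loopVar ++ ['.']
  (script, indent, indentText, prevLoop)

-- A's closing `while indent > 0` loop (indent is decremented twice per iteration)
def pvClose (first : Bool) (inner_exception : String) : Nat → Bool → List Char
  | 0, _ => []
  | (i + 1), inner_most =>
      let indentText := pvSpaces (i * 4)
      indentText ++ "except:\n".toList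
        ++ (if inner_most then indentText ++ "  ".toList ++ inner_exception.toList ++ "\n".toList else [])
        ++ indentText ++ "  if not ignoreExceptions: raise\n".toList
        ++ (if first then indentText ++ "if have_succeeded: break\n".toList else [])
        ++ pvClose first inner_exception (i - 1) false

def generateLoop_py (theThing : String) (innerLoop : String) (first : Bool) (names : Option (List String)) (inner_exception : String) : String :=
  let script : List Char := "have_succeeded = False\nignoreExceptions = True\n".toList
  let levels : List String := (PySem.Str.split? theThing ".*").getD []
  let st := levels.dropLast.foldl (pvStepA names) (script, 0, [], [])
  let script := st.1
  let indent := st.2.1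
  let indentText := st.2.2.1
  let prevLoop := st.2.2.2
  let script := script ++ indentText
  let substCount := PySem.Str.count innerLoop "%s" / 2
  let args := List.flatten (List.replicate substCount [String.ofList prevLoop, (PySem.List.pyGet? levels (-1)).getD ""])
  let script := script ++ pvFmt (PySem.Chars.replace innerLoop.toList "\n".toList ('\n' :: indentText)) args
  let script := script ++ "\n".toList ++ indentText ++ "have_succeeded = True\n".toList
  String.ofList (script ++ pvClose first inner_exception indent true)

-- ===== PORT B =====
-- B's recursive helper wrap(segs, depth, prevLoop)
def pvWrap (innerLoop : String) (first : Bool) (names : Option (List String)) (inner_exception : String) : List String → Nat → List Char → List Char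
  | [], _, _ => []
  | [seg], depth, prevLoop =>
      let pad := pvSpaces (4 * depth)
      let args := List.flatten (List.replicate (PySem.Str.count innerLoop "%s" / 2) [String.ofList prevLoop, seg])
      pad ++ pvFmt (PySem.Chars.replace innerLoop.toList "\n".toList ('\n' :: pad)) args
        ++ "\n".toList ++ pad ++ "have_succeeded = True\n".toList
  | seg :: seg2 :: rest, depth, prevLoop =>
      let pad := pvSpaces (4 * depth)
      let loopVar := "i_".toList ++ (toString depth).toList
      let inner := pvSpaces (4 * (depth + 1))
      let block := pad ++ "for ".toList ++ loopVar ++ " in ".toList ++ prevLoop ++ seg.toList ++ ":\n".toList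
      let block := block ++ (match names with
        | some ns => inner ++ ((PySem.List.pyGet? ns ((depth / 2 : Nat) : Int)).getD "").toList ++ " = ".toList ++ loopVar ++ "\n".toList
        | none => [])
      let block := block ++ inner ++ "try:\n".toList
      let block := block ++ pvWrap innerLoop first names inner_exception (seg2 :: rest) (depth + 2) (loopVar ++ ['.'])
      let block := block ++ inner ++ "except:\n".toList
      let block := block ++ (if (seg :: seg2 :: rest).length == 2 then inner ++ "  ".toList ++ inner_exception.toList ++ "\n".toList else [])
      let block := block ++ inner ++ "  if not ignoreExceptions: raise\n".toList
      block ++ (if first then inner ++ "if have_succeeded: break\n".toList else [])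

def generateLoop_py_alt (theThing : String) (innerLoop : String) (first : Bool) (names : Option (List String)) (inner_exception : String) : String :=
  String.ofList ("have_succeeded = False\nignoreExceptions = True\n".toList
    ++ pvWrap innerLoop first names inner_exception ((PySem.Str.split? theThing ".*").getD []) 0 [])

-- ===== PRECONDITION & SPEC =====
-- counts the real '%s' conversion specifiers of a format string; none where Python's
-- '%'-formatting raises on a '%' that starts neither '%s' nor '%%'
def pvSpecCnt : List Char → Option Nat
  | [] => some 0
  | '%' :: 's' :: r => (pvSpecCnt r).map (· + 1)
  | '%' :: '%' :: r => pvSpecCnt r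
  | '%' :: _ => none
  | _ :: r => pvSpecCnt r

-- Pre_ excludes exactly the inputs on which A raises: format strings whose '%'-formatting with
-- the generated argument tuple raises (a stray '%', or a specifier/argument count mismatch),
-- and a `names` list shorter than the number of generated loops (IndexError).
def Pre_generateLoop_py (theThing : String) (innerLoop : String) (first : Bool) (names : Option (List String)) (inner_exception : String) : Prop :=
  pvSpecCnt innerLoop.toList = some (2 * (PySem.Str.count innerLoop "%s" / 2)) ∧
  (names.all (fun ns => decide (((PySem.Str.split? theThing ".*").getD []).length - 1 ≤ ns.length))) = true
instance (theThing : String) (innerLoop : String) (first : Bool) (names : Option (List String)) (inner_exception : String) : Decidable (Pre_generateLoop_py theThing innerLoop first names inner_exception) := by unfold Pre_generateLoop_py; infer_instance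

def pvWitness_generateLoop_py : String × String × Bool × Option (List String) × String :=
  ("nodes.*items", "print(%s%s)", false, some ["n0"], "pass")

def Spec_generateLoop_py (theThing : String) (innerLoop : String) (first : Bool) (names : Option (List String)) (inner_exception : String) (out : String) : Prop := out = generateLoop_py_alt theThing innerLoop first names inner_exception
instance (theThing : String) (innerLoop : String) (first : Bool) (names : Option (List String)) (inner_exception : String) (out : String) : Decidable (Spec_generateLoop_py theThing innerLoop first names inner_exception out) := by unfold Spec_generateLoop_py; infer_instance

-- ===== CLAIM (what is proved, stated in full; the proofs are below) =====
def Claim_equal_generateLoop_py : Prop := ∀ (theThing : String) (innerLoop : String) (first : Bool) (names : Option (List String)) (inner_exception : String), Dom_generateLoop_py theThing innerLoop first names inner_exception → Pre_generateLoop_py theThing innerLoop first names inner_exception → Spec_generateLoop_py theThing innerLoop first names inner_exception (generateLoop_py theThing innerLoop first names inner_exception)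


-- ===== LEMMAS AND PROOFS =====
lemma pv_go_ne_nil (sep : List Char) : ∀ (fuel : Nat) (l cur : List Char) (acc : List (List Char)),
    PySem.Chars.splitOn.go sep fuel l cur acc ≠ [] := by
  intro fuel
  induction fuel with
  | zero => intro l cur acc; simp [PySem.Chars.splitOn.go]
  | succ n ih =>
    intro l cur acc
    cases l with
    | nil => simp [PySem.Chars.splitOn.go]
    | cons c rest =>
      rw [PySem.Chars.splitOn.go]
      split
      · exact ih _ _ _
      · exact ih _ _ _

lemma pv_levels_ne_nil (s : String) : (PySem.Str.split? s ".*").getD [] ≠ [] := by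
  simp [PySem.Str.split?, PySem.Chars.split?, PySem.Chars.splitOn]
  exact pv_go_ne_nil _ _ _ _ _

lemma pv_last_get (xs : List String) (x : String) :
    (PySem.List.pyGet? (xs ++ [x]) (-1)).getD "" = x := by
  simp [PySem.List.pyGet?, PySem.List.pyIdx?]

lemma pv_step_script (names : Option (List String)) (st : List Char × Nat × List Char × List Char) (level : String) :
    pvStepA names st level = (st.1 ++ (pvStepA names ([], st.2.1, st.2.2.1, st.2.2.2) level).1,
      (pvStepA names ([], st.2.1, st.2.2.1, st.2.2.2) level).2) := by
  obtain ⟨s, i, t, p⟩ := st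
  cases names <;> simp [pvStepA]

lemma pv_foldA_append (names : Option (List String)) (ls : List String) :
    ∀ (s t p : List Char) (i : Nat),
    ls.foldl (pvStepA names) (s, i, t, p) =
      ((s ++ (ls.foldl (pvStepA names) (([] : List Char), i, t, p)).1),
       (ls.foldl (pvStepA names) (([] : List Char), i, t, p)).2) := by
  induction ls with
  | nil => intro s t p i; simp
  | cons l ls ih =>
    intro s t p i
    simp only [List.foldl_cons]
    rw [pv_step_script names (s, i, t, p) l]
    rw [pv_step_script names ([], i, t, p) l]
    obtain ⟨s1, i1, t1, p1⟩ := pvStepA names (([]:List Char), i, t, p) l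
    simp only [List.nil_append]
    rw [ih (s ++ s1) t1 p1 i1, ih s1 t1 p1 i1]
    simp

lemma pv_foldA_indent (names : Option (List String)) (ls : List String) :
    ∀ (s t p : List Char) (i : Nat),
    (ls.foldl (pvStepA names) (s, i, t, p)).2.1 = i + 2 * ls.length := by
  induction ls with
  | nil => intro s t p i; simp
  | cons l ls ih =>
    intro s t p i
    simp only [List.foldl_cons]
    have h : (pvStepA names (s, i, t, p) l).2.1 = i + 2 := by cases names <;> simp [pvStepA]
    rw [show pvStepA names (s, i, t, p) l = ((pvStepA names (s, i, t, p) l).1, (pvStepA names (s, i, t, p) l).2.1,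
        (pvStepA names (s, i, t, p) l).2.2.1, (pvStepA names (s, i, t, p) l).2.2.2) from rfl]
    rw [ih, h]
    simp [List.length_cons]; ring

def pvBlockAt (first : Bool) (inner_exception : String) (i : Nat) (im : Bool) : List Char :=
  let indentText := pvSpaces (i * 4)
  indentText ++ "except:\n".toList
    ++ (if im then indentText ++ "  ".toList ++ inner_exception.toList ++ "\n".toList else [])
    ++ indentText ++ "  if not ignoreExceptions: raise\n".toList
    ++ (if first then indentText ++ "if have_succeeded: break\n".toList else [])

def pvCloseN (first : Bool) (inner_exception : String) : Nat → Nat → Bool → List Char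
  | 0, _, _ => []
  | (m + 1), base, im => pvBlockAt first inner_exception (base + 2 * m + 1) im
      ++ pvCloseN first inner_exception m base false

lemma pv_close_eq (first : Bool) (ie : String) : ∀ (m : Nat) (im : Bool),
    pvClose first ie (2 * m) im = pvCloseN first ie m 0 im := by
  intro m
  induction m with
  | zero => intro im; simp [pvClose, pvCloseN]
  | succ n ih =>
    intro im
    have h2 : 2 * (n + 1) = (2 * n + 1) + 1 := by ring
    rw [h2, pvClose, pvCloseN]
    simp only [Nat.add_sub_cancel]
    rw [ih false]
    simp [pvBlockAt, List.append_assoc]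

lemma pv_closeN_snoc (first : Bool) (ie : String) : ∀ (m base : Nat) (im : Bool),
    pvCloseN first ie (m + 1) base im =
      pvCloseN first ie m (base + 2) im ++ pvBlockAt first ie (base + 1) (im && (m == 0)) := by
  intro m
  induction m with
  | zero => intro base im; simp [pvCloseN]
  | succ n ih =>
    intro base im
    rw [pvCloseN, ih, pvCloseN]
    have : base + 2 * (n + 1) + 1 = base + 2 + 2 * n + 1 := by ring
    rw [this]
    simp [List.append_assoc]

lemma pv_main (innerLoop : String) (first : Bool) (names : Option (List String)) (ie : String) :
    ∀ (ls : List String) (lastSeg : String) (d : Nat) (p : List Char),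
    (let st := ls.foldl (pvStepA names) (([] : List Char), 2 * d, pvSpaces (2 * d * 4), p)
     st.1 ++ st.2.2.1
       ++ pvFmt (PySem.Chars.replace innerLoop.toList "\n".toList ('\n' :: st.2.2.1))
            (List.flatten (List.replicate (PySem.Str.count innerLoop "%s" / 2) [String.ofList st.2.2.2, lastSeg]))
       ++ "\n".toList ++ st.2.2.1 ++ "have_succeeded = True\n".toList
       ++ pvCloseN first ie ls.length (2 * d) true)
    = pvWrap innerLoop first names ie (ls ++ [lastSeg]) (2 * d) p := by
  intro ls
  induction ls with
  | nil =>
    intro lastSeg d p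
    simp only [List.foldl_nil, List.nil_append, List.length_nil]
    rw [pvCloseN]
    simp [pvWrap, Nat.mul_comm]
  | cons l ls ih =>
    intro lastSeg d p
    simp only [List.foldl_cons, List.length_cons]
    have hdiv : (2 * d + 1) / 2 = d := by omega
    have hdiv2 : (2 * d) / 2 = d := by omega
    have hstep : pvStepA names (([] : List Char), 2 * d, pvSpaces (2 * d * 4), p) l =
        (pvSpaces (2 * d * 4) ++ "for ".toList ++ ("i_".toList ++ (toString (2 * d)).toList) ++ " in ".toList ++ p ++ l.toList ++ ":\n".toList
          ++ (match names with
              | some ns => pvSpaces ((2 * d + 1) * 4) ++ ((PySem.List.pyGet? ns ((d : Nat) : Int)).getD "").toList ++ " = ".toList ++ ("i_".toList ++ (toString (2 * d)).toList) ++ "\n".toList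
              | none => [])
          ++ pvSpaces ((2 * d + 1) * 4) ++ "try:\n".toList,
         2 * (d + 1), pvSpaces (2 * (d + 1) * 4),
         ("i_".toList ++ (toString (2 * d)).toList) ++ ['.']) := by
      have e1 : 2 * d + 1 + 1 = 2 * (d + 1) := by ring
      cases names <;> simp [pvStepA, hdiv, e1]
    rw [hstep]
    rw [pv_foldA_append]
    rw [pv_closeN_snoc]
    have e2 : 2 * d + 2 = 2 * (d + 1) := by ring
    rw [e2]
    obtain ⟨m, ms, hm⟩ : ∃ m ms, ls ++ [lastSeg] = m :: ms := by cases ls <;> exact ⟨_, _, rfl⟩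
    have hlen : ms.length = ls.length := by
      have := congrArg List.length hm; simp at this; omega
    have := ih lastSeg (d + 1) (("i_".toList ++ (toString (2 * d)).toList) ++ ['.'])
    simp only [hm] at this
    rw [show (true && (ls.length == 0)) = (((l :: m :: ms).length) == 2) by simp [hlen]]
    simp only [List.cons_append]
    rw [hm]
    rw [pvWrap.eq_def]
    dsimp only
    simp only [hdiv2, e2]
    simp only [List.append_assoc] at this ⊢
    rw [← this]
    have c1 : 4 * (2 * d) = 2 * d * 4 := by ring
    have c2 : 4 * (2 * d + 1) = (2 * d + 1) * 4 := by ring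
    simp only [c1, c2]
    cases names <;> simp [pvBlockAt, List.append_assoc]

-- ===== VERDICT (by name: the statement is the Claim_ definition above) =====
theorem generateLoop_py_spec : Claim_equal_generateLoop_py := by
  intro theThing innerLoop first names inner_exception _hdom _hpre
  show generateLoop_py theThing innerLoop first names inner_exception =
    generateLoop_py_alt theThing innerLoop first names inner_exception
  unfold generateLoop_py generateLoop_py_alt
  obtain ⟨ls, lastSeg, hsplit⟩ : ∃ ls l, (PySem.Str.split? theThing ".*").getD [] = ls ++ [l] := by
    rcases List.eq_nil_or_concat ((PySem.Str.split? theThing ".*").getD []) with h | ⟨ls, l, h⟩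
    · exact absurd h (pv_levels_ne_nil _)
    · exact ⟨ls, l, by simpa [List.concat_eq_append] using h⟩
  rw [hsplit]
  simp only [List.dropLast_concat, pv_last_get]
  rw [pv_foldA_append]
  rw [pv_foldA_indent]
  rw [show (0 : Nat) + 2 * ls.length = 2 * ls.length from by omega]
  rw [pv_close_eq]
  have hmain := pv_main innerLoop first names inner_exception ls lastSeg 0 []
  simp only [Nat.mul_zero, Nat.zero_mul] at hmain
  rw [show pvSpaces 0 = ([] : List Char) from rfl] at hmain
  rw [← hmain]
  simp [List.append_assoc]
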